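-- pv_equiv track=rewrite | github.com/Websail-NU/seqmodel | script/ngram_repetition.py | eval_file
-- ===== SOURCE A (Python) =====
-- from collections import Counter
--
-- def make_ngrams(sequence, n):
--     ngrams = []
--     sequence = tuple(sequence)
--     for i in range(n, len(sequence) + 1):
--         yield(sequence[i - n: i])
--
-- def count_ngrams(sequence, n, counter=None, total=0, ignore_ngrams=None):
--     ignore_ngrams = ignore_ngrams or set()
--     counter = counter or Counter()
--     for ngram in make_ngrams(sequence, n):
--         if ' '.join(ngram).lower() in ignore_ngrams:
--             continue
--         counter[ngram] += 1
--         total += 1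
--     return counter, total
--
-- def eval_file(lines, n_list=(1, 2, 3, 4)):
--     totals = [0 for __ in n_list]
--     total_dups = [0 for __ in n_list]
--     for line in lines:
--         line = line.strip()
--         if not line:
--             continue
--         tokens = line.split('\t')[-1].split(' ')
--         for i, n in enumerate(n_list):
--             ngram_counts, total = count_ngrams(tokens, n)
--             dup = sum(map(lambda x: x - 1,
--                           filter(lambda x: x > 1, ngram_counts.values())))
--             totals[i] += total
--             total_dups[i] += dup
--     return total_dups, totals
-- ===== SOURCE B (Python) =====
-- def eval_file(lines, n_list=(1, 2, 3, 4)):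
--     def stats(tokens, n):
--         # sort the n-grams, then count adjacent equal pairs: each extra copy of an
--         # n-gram sits next to another copy in sorted order, so that count is the
--         # number of duplicated occurrences.
--         grams = sorted(tuple(tokens[j - n:j]) for j in range(n, len(tokens) + 1))
--         dup = sum(1 for a, b in zip(grams, grams[1:]) if a == b)
--         return dup, len(grams)
--     total_dups = [0] * len(n_list)
--     totals = [0] * len(n_list)
--     for line in lines:
--         line = line.strip()
--         if not line:
--             continue
--         tokens = line.split('\t')[-1].split(' ')
--         per = [stats(tokens, n) for n in n_list]
--         total_dups = [d + p[0] for d, p in zip(total_dups, per)]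
--         totals = [t + p[1] for t, p in zip(totals, per)]
--     return total_dups, totals
-- ===== Notes on version B (the rewrite author's own statement) =====
-- stated objective: alternative
-- what changed: Replaces A's per-line Counter pipeline (hash-count every n-gram via count_ngrams, join/lower each n-gram against the ignore set, then sum over the filtered counts) with sort-then-scan: each line's n-gram list is sorted and duplicated occurrences are counted as adjacent equal pairs, with per-n results accumulated by zipping into the running lists instead of indexed updates.
import Mathlib
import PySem

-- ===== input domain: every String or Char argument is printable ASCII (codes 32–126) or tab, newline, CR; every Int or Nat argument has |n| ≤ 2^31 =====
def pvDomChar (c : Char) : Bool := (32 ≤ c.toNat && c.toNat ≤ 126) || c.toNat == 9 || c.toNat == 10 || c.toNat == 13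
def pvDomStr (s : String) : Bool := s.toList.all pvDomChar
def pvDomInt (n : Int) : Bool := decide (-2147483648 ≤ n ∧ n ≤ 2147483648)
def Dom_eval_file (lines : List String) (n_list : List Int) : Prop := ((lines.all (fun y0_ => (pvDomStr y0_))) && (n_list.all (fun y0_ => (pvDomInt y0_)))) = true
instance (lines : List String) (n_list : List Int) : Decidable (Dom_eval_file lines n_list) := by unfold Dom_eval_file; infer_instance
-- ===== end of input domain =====

-- B replaces A's per-line Counter pipeline (hash-count every n-gram, then sum the
-- filtered counts) by sort-then-scan: sort each line's n-gram list and count adjacent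
-- equal pairs, accumulating per-n results by zipping; objective: alternative.

-- ===== PORT A =====
def make_ngrams (sequence : List String) (n : Int) : List (List String) :=
  (PySem.List.pyRange n (PySem.List.len sequence + 1) 1).map
    (fun i => PySem.List.slice sequence (some (i - n)) (some i))

-- `counter or Counter()` / `ignore_ngrams or set()`: eval_file passes the defaults, so the
-- resolved values are the empty counter and empty set, taken here as parameters.
def count_ngrams (sequence : List String) (n : Int)
    (counter : PySem.Dict (List String) Int) (total : Int)
    (ignore_ngrams : PySem.Set String) : PySem.Dict (List String) Int × Int :=
  (make_ngrams sequence n).foldl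
    (fun st ngram =>
      if PySem.Set.contains ignore_ngrams (PySem.Str.lower (PySem.Str.join " " ngram)) then st
      else (st.1.modify ngram 0 (· + 1), st.2 + 1))
    (counter, total)

def eval_file (lines : List String) (n_list : List Int) : List Int × List Int :=
  let totals : List Int := n_list.map (fun _ => 0)
  let total_dups : List Int := n_list.map (fun _ => 0)
  let st := lines.foldl
    (fun (st : List Int × List Int) line =>
      let line := PySem.Str.strip line
      if line = "" then st
      else
        -- split? with a nonempty literal separator is always `some`
        let tokens := (PySem.Str.split?
          (PySem.List.pyGetD ((PySem.Str.split? line "\t").getD []) (-1) "") " ").getD []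
        (PySem.List.enumerate n_list 0).foldl
          (fun (st2 : List Int × List Int) p =>
            let r := count_ngrams tokens p.2 PySem.Dict.empty 0 PySem.Set.empty
            let dup := (((r.1.values).filter (fun x => 1 < x)).map (fun x => x - 1)).sum
            (PySem.List.pySetD st2.1 p.1 (PySem.List.pyGetD st2.1 p.1 0 + dup),
             PySem.List.pySetD st2.2 p.1 (PySem.List.pyGetD st2.2 p.1 0 + r.2)))
          st)
    (total_dups, totals)
  st

-- ===== PORT B =====
-- Source B's nested `stats(tokens, n)`: sorted n-gram list, duplicates = adjacent equal pairs
def stats_alt (tokens : List String) (n : Int) : Int × Int :=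
  let grams := PySem.List.sorted
    ((PySem.List.pyRange n (PySem.List.len tokens + 1) 1).map
      (fun j => PySem.List.slice tokens (some (j - n)) (some j)))
    (fun x => x) false
  let dup := (grams.zip (PySem.List.slice grams (some 1) none)).foldl
    (fun acc p => if p.1 = p.2 then acc + 1 else acc) (0 : Int)
  (dup, PySem.List.len grams)

def eval_file_alt (lines : List String) (n_list : List Int) : List Int × List Int :=
  lines.foldl
    (fun (st : List Int × List Int) line =>
      let line := PySem.Str.strip line
      if line = "" then st
      else
        -- split? with a nonempty literal separator is always `some`
        let tokens := (PySem.Str.split?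
          (PySem.List.pyGetD ((PySem.Str.split? line "\t").getD []) (-1) "") " ").getD []
        let per := n_list.map (fun n => stats_alt tokens n)
        ((st.1.zip per).map (fun p => p.1 + p.2.1),
         (st.2.zip per).map (fun p => p.1 + p.2.2)))
    (n_list.map (fun _ => 0), n_list.map (fun _ => 0))

-- ===== PRECONDITION & SPEC =====
def Spec_eval_file (lines : List String) (n_list : List Int) (out : List Int × List Int) : Prop := out = eval_file_alt lines n_list
instance (lines : List String) (n_list : List Int) (out : List Int × List Int) : Decidable (Spec_eval_file lines n_list out) := by unfold Spec_eval_file; infer_instance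

-- ===== CLAIM (what is proved, stated in full; the proofs are below) =====
def Claim_equal_eval_file : Prop := ∀ (lines : List String) (n_list : List Int), Dom_eval_file lines n_list → Spec_eval_file lines n_list (eval_file lines n_list)

-- ===== LEMMAS AND PROOFS =====

-- ---- A-side characterisation: per (tokens, n), dup = total − #distinct ----

theorem foldl_pair (g : List (List String)) (d : PySem.Dict (List String) Int) (t : Int) :
    List.foldl (fun (st : PySem.Dict (List String) Int × Int) ngram =>
        (st.1.modify ngram 0 (· + 1), st.2 + 1)) (d, t) g
      = (List.foldl (fun d x => d.modify x 0 (· + 1)) d g, t + g.length) := by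
  induction g generalizing d t with
  | nil => simp
  | cons x xs ih => simp [ih]; omega

-- The ignore set is empty, so A's loop counts every n-gram: result = (Counter(g), len g)
theorem count_ngrams_empty (sequence : List String) (n : Int) :
    count_ngrams sequence n PySem.Dict.empty 0 PySem.Set.empty
      = (PySem.Dict.counter (make_ngrams sequence n),
         ((make_ngrams sequence n).length : Int)) := by
  simp only [count_ngrams]
  rw [PySem.Dict.counter_eq_foldl]
  have hif : (fun (st : PySem.Dict (List String) Int × Int) (ngram : List String) =>
      if PySem.Set.contains PySem.Set.empty (PySem.Str.lower (PySem.Str.join " " ngram)) then st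
      else (st.1.modify ngram 0 (· + 1), st.2 + 1))
      = fun st ngram => (st.1.modify ngram 0 (· + 1), st.2 + 1) := by
    funext st ngram; rfl
  rw [hif, foldl_pair]
  simp

-- sum of (v-1) over values > 1 equals (sum of values) - (number of values), when all values ≥ 1
theorem filter_sum_sub (vs : List Int) (h : ∀ v ∈ vs, 1 ≤ v) :
    ((vs.filter (fun x => 1 < x)).map (fun x => x - 1)).sum = vs.sum - vs.length := by
  induction vs with
  | nil => simp
  | cons v vs ih =>
    have hv := h v (by simp)
    have ih' := ih (fun w hw => h w (by simp [hw]))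
    by_cases h1 : 1 < v <;> simp [h1, ih'] <;> omega

-- the counts of the distinct elements of g sum to g.length
theorem sum_counts (g : List (List String)) :
    ((PySem.Set.ofList g).map (fun k => (g.count k : Int))).sum = (g.length : Int) := by
  have hperm : (PySem.Set.ofList g).Perm g.dedup := by
    rw [List.perm_ext_iff_of_nodup (PySem.Set.nodup_ofList g) g.nodup_dedup]
    intro a; rw [PySem.Set.mem_ofList, List.mem_dedup]
  rw [(hperm.map (fun k => (g.count k : Int))).sum_eq]
  have hnat : (g.dedup.map (fun k => g.count k)).sum = g.length := by
    rw [lawful_beq_subsingleton (List.instBEq : BEq (List String)) instBEqOfDecidableEq]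
    exact List.sum_map_count_dedup_eq_length g
  rw [← hnat, Nat.cast_list_sum, List.map_map]
  rfl

-- A's per-(line, n) duplicate count is total minus distinct
theorem dup_eq (g : List (List String)) :
    ((((PySem.Dict.counter g).values).filter (fun x => 1 < x)).map (fun x => x - 1)).sum
      = (g.length : Int) - ((PySem.Set.ofList g).length : Int) := by
  have hvals : (PySem.Dict.counter g).values
      = (PySem.Set.ofList g).map (fun k => (g.count k : Int)) := by
    show (PySem.Dict.counter g).items.map (·.2) = _
    rw [PySem.Dict.items_counter, List.map_map]
    rfl
  rw [hvals]
  rw [filter_sum_sub _ (by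
    intro v hv
    obtain ⟨k, hk, rfl⟩ := List.mem_map.mp hv
    have hkg : k ∈ g := (PySem.Set.mem_ofList _ _).mp hk
    exact_mod_cast Nat.one_le_iff_ne_zero.mpr (Nat.pos_iff_ne_zero.mp (List.count_pos_iff.mpr hkg)))]
  rw [sum_counts, List.length_map]

-- ---- B-side characterisation: adjacent equal pairs in sorted order = total − #distinct ----

-- Python's `sorted` on tuples of strings, re-expressed with Mathlib's lexicographic
-- LinearOrder on List String (same order; this only changes the instance)
def sortedLex (xs : List (List String)) : List (List String) :=
  @PySem.List.sorted (List String) (List String)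
    (@Preorder.toLT _ (@PartialOrder.toPreorder _ (@LinearOrder.toPartialOrder _ inferInstance)))
    (@LinearOrder.toDecidableLT _ inferInstance) xs (fun x => x) false

theorem sorted_eq_sortedLex (xs : List (List String)) :
    PySem.List.sorted xs (fun x => x) false = sortedLex xs := by
  rw [PySem.List.sorted_eq_foldl_insertBy, sortedLex,
    @PySem.List.sorted_eq_foldl_insertBy (List String) (List String)
      (@Preorder.toLT _ (@PartialOrder.toPreorder _ (@LinearOrder.toPartialOrder _ inferInstance)))
      (@LinearOrder.toDecidableLT _ inferInstance) xs (fun x => x)]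
  congr 1
  funext acc x
  congr 1
  funext a b
  simp [decide_eq_decide]

theorem slex_pairwise (xs : List (List String)) : (sortedLex xs).Pairwise (fun a b => a ≤ b) :=
  PySem.List.sorted_pairwise xs (fun x => x)

theorem slex_perm (xs : List (List String)) : (sortedLex xs).Perm xs :=
  @PySem.List.sorted_perm (List String) (List String)
    (@Preorder.toLT _ (@PartialOrder.toPreorder _ (@LinearOrder.toPartialOrder _ inferInstance)))
    (@LinearOrder.toDecidableLT _ inferInstance) xs (fun x => x) false

-- in a ≤-sorted list, (#adjacent equal pairs) + (#distinct) = length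
theorem adj_nat (s : List (List String)) (h : s.Pairwise (fun a b => a ≤ b)) :
    (s.zip s.tail).countP (fun p => decide (p.1 = p.2)) + s.dedup.length = s.length := by
  induction s with
  | nil => simp
  | cons x t ih =>
    cases t with
    | nil => simp
    | cons y t' =>
      have hxy : x ≤ y := (List.pairwise_cons.mp h).1 y (by simp)
      have htp : (y :: t').Pairwise (fun a b => a ≤ b) := (List.pairwise_cons.mp h).2
      have hmem : x ∈ y :: t' ↔ x = y := by
        constructor
        · intro hm
          rcases List.mem_cons.mp hm with h1 | h1
          · exact h1
          · exact le_antisymm hxy ((List.pairwise_cons.mp htp).1 x h1)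
        · intro h1; simp [h1]
      have ih' := ih htp
      by_cases hx : x = y
      · rw [List.dedup_cons_of_mem (hmem.mpr hx)]
        simp only [List.tail_cons, List.zip_cons_cons, List.countP_cons]
        simp only [List.tail_cons] at ih'
        simp [hx] at ih' ⊢
        omega
      · rw [List.dedup_cons_of_notMem (fun hm => hx (hmem.mp hm))]
        simp only [List.tail_cons, List.zip_cons_cons, List.countP_cons]
        simp only [List.tail_cons] at ih'
        simp [hx] at ih' ⊢
        omega

-- #distinct is permutation-invariant and equals the PySem.Set size
theorem dedup_len_eq_set_len (g : List (List String)) :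
    g.dedup.length = (PySem.Set.ofList g).length := by
  have hperm : (PySem.Set.ofList g).Perm g.dedup := by
    rw [List.perm_ext_iff_of_nodup (PySem.Set.nodup_ofList g) g.nodup_dedup]
    intro a; rw [PySem.Set.mem_ofList, List.mem_dedup]
  exact (hperm.length_eq).symm

-- B's per-(line, n) result equals (total − #distinct, total) over the raw n-gram list
theorem stats_alt_eq (tokens : List String) (n : Int) :
    stats_alt tokens n
      = (((make_ngrams tokens n).length : Int)
           - ((PySem.Set.ofList (make_ngrams tokens n)).length : Int),
         ((make_ngrams tokens n).length : Int)) := by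
  simp only [stats_alt, make_ngrams, PySem.List.slice_from_one, PySem.List.len_eq]
  rw [sorted_eq_sortedLex]
  set g := (PySem.List.pyRange n ((tokens.length : Int) + 1) 1).map
      (fun i => PySem.List.slice tokens (some (i - n)) (some i)) with hg
  have hlen : (sortedLex g).length = g.length := (slex_perm g).length_eq
  have hded : (sortedLex g).dedup.length = g.dedup.length := ((slex_perm g).dedup).length_eq
  have hadj := adj_nat (sortedLex g) (slex_pairwise g)
  have hfold : ((sortedLex g).zip (sortedLex g).tail).foldl
      (fun acc p => if p.1 = p.2 then acc + 1 else acc) (0 : Int)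
      = (((sortedLex g).zip (sortedLex g).tail).countP (fun p => decide (p.1 = p.2)) : Int) := by
    have hfn : (fun (acc : Int) (p : List String × List String) =>
        if p.1 = p.2 then acc + 1 else acc)
        = (fun acc p => if (fun q : List String × List String => decide (q.1 = q.2)) p = true
            then acc + 1 else acc) := by
      funext acc p; split_ifs <;> simp_all
    rw [hfn, PySem.List.foldl_count_if]
    simp
  rw [Prod.mk.injEq]
  constructor
  · rw [hfold]
    have := dedup_len_eq_set_len g
    omega
  · rw [hlen]

-- ---- the indexed enumerate-fold of A equals B's zip accumulation ----

theorem enum_fold (f : Int → Int × Int) (n_list : List Int) (s : Nat)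
    (dpre drest tpre trest : List Int)
    (hd : dpre.length = s) (ht : tpre.length = s)
    (hdl : drest.length = n_list.length) (htl : trest.length = n_list.length) :
    (PySem.List.enumerate n_list (s : Int)).foldl
      (fun (st2 : List Int × List Int) p =>
        (PySem.List.pySetD st2.1 p.1 (PySem.List.pyGetD st2.1 p.1 0 + (f p.2).1),
         PySem.List.pySetD st2.2 p.1 (PySem.List.pyGetD st2.2 p.1 0 + (f p.2).2)))
      (dpre ++ drest, tpre ++ trest)
    = (dpre ++ ((drest.zip (n_list.map f)).map (fun p => p.1 + p.2.1)),
       tpre ++ ((trest.zip (n_list.map f)).map (fun p => p.1 + p.2.2))) := by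
  induction n_list generalizing s dpre drest tpre trest with
  | nil =>
    rw [List.length_eq_zero_iff.mp hdl, List.length_eq_zero_iff.mp htl]
    simp [PySem.List.enumerate]
  | cons n rest ih =>
    cases drest with
    | nil => simp at hdl
    | cons x dr =>
      cases trest with
      | nil => simp at htl
      | cons z tr =>
        rw [PySem.List.enumerate_cons, List.foldl_cons]
        have hget1 : PySem.List.pyGetD (dpre ++ x :: dr) ((s : Int)) 0 = x := by
          rw [PySem.List.pyGetD_natCast]; simp [← hd]
        have hget2 : PySem.List.pyGetD (tpre ++ z :: tr) ((s : Int)) 0 = z := by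
          rw [PySem.List.pyGetD_natCast]; simp [← ht]
        have hset1 : PySem.List.pySetD (dpre ++ x :: dr) ((s : Int)) (x + (f n).1)
            = (dpre ++ [x + (f n).1]) ++ dr := by
          rw [PySem.List.pySetD_natCast]; simp [← hd]
        have hset2 : PySem.List.pySetD (tpre ++ z :: tr) ((s : Int)) (z + (f n).2)
            = (tpre ++ [z + (f n).2]) ++ tr := by
          rw [PySem.List.pySetD_natCast]; simp [← ht]
        simp only [hget1, hget2, hset1, hset2]
        have hs1 : ((s : Int) + 1) = ((s + 1 : Nat) : Int) := by push_cast; ring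
        rw [hs1, ih (s + 1) (dpre ++ [x + (f n).1]) dr (tpre ++ [z + (f n).2]) tr
          (by simp [hd]) (by simp [ht]) (by simpa using hdl) (by simpa using htl)]
        simp

-- A's per-line inner loop body, rewritten through the characterisations of both sides
theorem body_eq (tokens : List String) :
    (fun (st2 : List Int × List Int) (p : Int × Int) =>
      let r := count_ngrams tokens p.2 PySem.Dict.empty 0 PySem.Set.empty
      let dup := (((r.1.values).filter (fun x => 1 < x)).map (fun x => x - 1)).sum
      (PySem.List.pySetD st2.1 p.1 (PySem.List.pyGetD st2.1 p.1 0 + dup),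
       PySem.List.pySetD st2.2 p.1 (PySem.List.pyGetD st2.2 p.1 0 + r.2)))
    = (fun (st2 : List Int × List Int) p =>
      (PySem.List.pySetD st2.1 p.1 (PySem.List.pyGetD st2.1 p.1 0 + (stats_alt tokens p.2).1),
       PySem.List.pySetD st2.2 p.1 (PySem.List.pyGetD st2.2 p.1 0 + (stats_alt tokens p.2).2))) := by
  funext st2 p
  simp only [count_ngrams_empty, stats_alt_eq, dup_eq]

-- the whole per-line fold over lines, with the length invariant
theorem outer_fold (n_list : List Int) (lines : List String) (d t : List Int)
    (hd : d.length = n_list.length) (ht : t.length = n_list.length) :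
    lines.foldl
      (fun (st : List Int × List Int) line =>
        let line := PySem.Str.strip line
        if line = "" then st
        else
          let tokens := (PySem.Str.split?
            (PySem.List.pyGetD ((PySem.Str.split? line "\t").getD []) (-1) "") " ").getD []
          (PySem.List.enumerate n_list 0).foldl
            (fun (st2 : List Int × List Int) p =>
              let r := count_ngrams tokens p.2 PySem.Dict.empty 0 PySem.Set.empty
              let dup := (((r.1.values).filter (fun x => 1 < x)).map (fun x => x - 1)).sum
              (PySem.List.pySetD st2.1 p.1 (PySem.List.pyGetD st2.1 p.1 0 + dup),
               PySem.List.pySetD st2.2 p.1 (PySem.List.pyGetD st2.2 p.1 0 + r.2)))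
            st)
      (d, t)
    = lines.foldl
      (fun (st : List Int × List Int) line =>
        let line := PySem.Str.strip line
        if line = "" then st
        else
          let tokens := (PySem.Str.split?
            (PySem.List.pyGetD ((PySem.Str.split? line "\t").getD []) (-1) "") " ").getD []
          let per := n_list.map (fun n => stats_alt tokens n)
          ((st.1.zip per).map (fun p => p.1 + p.2.1),
           (st.2.zip per).map (fun p => p.1 + p.2.2)))
      (d, t) := by
  induction lines generalizing d t with
  | nil => rfl
  | cons line rest ih =>
    rw [List.foldl_cons, List.foldl_cons]
    by_cases hline : PySem.Str.strip line = ""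
    · simp only [hline, reduceIte]
      exact ih d t hd ht
    · simp only [hline, reduceIte]
      set tokens := (PySem.Str.split?
        (PySem.List.pyGetD ((PySem.Str.split? (PySem.Str.strip line) "\t").getD []) (-1) "")
        " ").getD [] with htok
      have hs := enum_fold (fun m => stats_alt tokens m) n_list 0 [] d [] t rfl rfl hd ht
      simp only [List.nil_append, Nat.cast_zero] at hs
      rw [body_eq tokens, hs]
      exact ih _ _ (by simp [hd]) (by simp [ht])

-- ===== VERDICT (by name: the statement is the Claim_ definition above) =====
theorem eval_file_spec : Claim_equal_eval_file := by
  intro lines n_list _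
  unfold Spec_eval_file eval_file eval_file_alt
  dsimp only
  exact outer_fold n_list lines _ _ (by simp) (by simp)
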